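-- pv_equiv track=rewrite | github.com/pypi-data/pypi-mirror-392 | packages/distopf/distopf-0.3.1-py3-none-any.whl/distopf/cim_importer/utils/phase_utils.py | filter_standard_phases
-- ===== SOURCE A (Python) =====
-- def filter_standard_phases(phases: str) -> str:
--     """
--     Filter to only include standard three-phase system phases (a, b, c).
--
--     Args:
--         phases: Phase string that may include secondary phases
--
--     Returns:
--         Filtered phase string with only a, b, c phases
--     """
--     standard_phases = set()
--     for phase in phases:
--         if phase in ["a", "b", "c"]:
--             standard_phases.add(phase)
--
--     # Default to three-phase if no standard phases found
--     if not standard_phases: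
--         standard_phases = {"a", "b", "c"}
--
--     return "".join(sorted(standard_phases))
-- ===== SOURCE B (Python) =====
-- def filter_standard_phases(phases: str) -> str:
--     # Walk the fixed canonical alphabet and keep the letters present in the input;
--     # default to the full three-phase string when none is found.
--     result = "".join(ch for ch in "abc" if ch in phases)
--     return result or "abc"
-- ===== Notes on version B (the rewrite author's own statement) =====
-- stated objective: simpler
-- what changed: B loops over the fixed canonical alphabet 'abc' testing membership in the input (with 'or' for the empty default), instead of A's loop over the input accumulating a set that is then sorted and joined.
import Mathlib
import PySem

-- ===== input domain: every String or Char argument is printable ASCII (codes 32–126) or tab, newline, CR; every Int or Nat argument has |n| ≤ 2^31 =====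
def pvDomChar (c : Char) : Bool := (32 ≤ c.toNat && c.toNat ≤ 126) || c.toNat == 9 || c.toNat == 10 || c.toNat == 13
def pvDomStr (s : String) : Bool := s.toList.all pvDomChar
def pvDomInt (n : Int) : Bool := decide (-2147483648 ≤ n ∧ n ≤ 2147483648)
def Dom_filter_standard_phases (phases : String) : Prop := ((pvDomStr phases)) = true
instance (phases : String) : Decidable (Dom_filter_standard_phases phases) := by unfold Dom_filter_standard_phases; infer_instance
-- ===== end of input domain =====

-- B scans the fixed canonical alphabet "abc" and tests membership in the input instead of
-- scanning the input and accumulating a set (objective: simpler — no set, no sort).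

-- ===== PORT A =====
-- loop over the input characters, accumulating a set of standard phases
def filter_standard_phases (phases : String) : String :=
  let standard_phases : PySem.Set Char :=
    phases.toList.foldl
      (fun acc phase => if ['a', 'b', 'c'].contains phase then acc.add phase else acc)
      PySem.Set.empty
  let standard_phases : PySem.Set Char :=
    if standard_phases = [] then PySem.Set.ofList ['a', 'b', 'c'] else standard_phases
  String.ofList (PySem.List.sorted standard_phases (fun x => x))

-- ===== PORT B =====
-- filter the fixed alphabet "abc" by membership in the input
-- (single-character `ch in phases` is exactly membership of the char in the string's characters)
def filter_standard_phases_alt (phases : String) : String :=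
  let result : List Char := "abc".toList.filter (fun ch => phases.toList.contains ch)
  -- `result or "abc"`: the joined string is falsy exactly when the char list is empty
  if result = [] then "abc" else String.ofList result

-- ===== PRECONDITION & SPEC =====
def Spec_filter_standard_phases (phases : String) (out : String) : Prop := out = filter_standard_phases_alt phases
instance (phases : String) (out : String) : Decidable (Spec_filter_standard_phases phases out) := by unfold Spec_filter_standard_phases; infer_instance

-- ===== CLAIM (what is proved, stated in full; the proofs are below) =====
def Claim_equal_filter_standard_phases : Prop := ∀ (phases : String), Dom_filter_standard_phases phases → Spec_filter_standard_phases phases (filter_standard_phases phases)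

-- ===== LEMMAS AND PROOFS =====

-- Invariant of A's accumulation loop: the state stays duplicate-free and collects exactly the
-- standard phases seen so far.
theorem pv_loop_inv (l : List Char) : ∀ (acc : PySem.Set Char), acc.Nodup →
    (l.foldl (fun acc phase => if ['a', 'b', 'c'].contains phase then acc.add phase else acc) acc).Nodup
    ∧ ∀ c, c ∈ l.foldl (fun acc phase => if ['a', 'b', 'c'].contains phase then acc.add phase else acc) acc
        ↔ c ∈ acc ∨ (c ∈ ['a', 'b', 'c'] ∧ c ∈ l) := by
  induction l with
  | nil => intro acc h; simpa using h
  | cons x t ih =>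
    intro acc h
    by_cases hx : x ∈ (['a', 'b', 'c'] : List Char)
    · have hxb : (['a', 'b', 'c'] : List Char).contains x = true := by
        simpa [List.contains_iff_mem] using hx
      obtain ⟨hn, hm⟩ := ih (acc.add x) (PySem.Set.nodup_add acc x h)
      rw [List.foldl_cons, if_pos hxb]
      refine ⟨hn, fun c => ?_⟩
      rw [hm c, PySem.Set.mem_add]
      constructor
      · rintro (⟨hc | rfl⟩ | ⟨h1, h2⟩)
        · exact Or.inl hc
        · exact Or.inr ⟨hx, by simp⟩
        · exact Or.inr ⟨h1, by simp [h2]⟩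
      · rintro (hc | ⟨h1, h2⟩)
        · exact Or.inl (Or.inl hc)
        · rcases List.mem_cons.mp h2 with rfl | h2
          · exact Or.inl (Or.inr rfl)
          · exact Or.inr ⟨h1, h2⟩
    · have hxb : ¬ ((['a', 'b', 'c'] : List Char).contains x = true) := by
        simpa [List.contains_iff_mem] using hx
      obtain ⟨hn, hm⟩ := ih acc h
      rw [List.foldl_cons, if_neg hxb]
      refine ⟨hn, fun c => ?_⟩
      rw [hm c]
      constructor
      · rintro (hc | ⟨h1, h2⟩)
        · exact Or.inl hc
        · exact Or.inr ⟨h1, by simp [h2]⟩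
      · rintro (hc | ⟨h1, h2⟩)
        · exact Or.inl hc
        · rcases List.mem_cons.mp h2 with rfl | h2
          · exact absurd h1 hx
          · exact Or.inr ⟨h1, h2⟩

theorem pv_main (phases : String) :
    filter_standard_phases phases = filter_standard_phases_alt phases := by
  simp only [filter_standard_phases, filter_standard_phases_alt]
  set l := phases.toList with hl
  obtain ⟨hSn, hSm⟩ := pv_loop_inv l PySem.Set.empty (by simp [PySem.Set.empty])
  set S := l.foldl (fun acc phase => if ['a', 'b', 'c'].contains phase then acc.add phase else acc)
      PySem.Set.empty with hS
  set target := ("abc".toList).filter (fun ch => l.contains ch) with ht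
  have habc : "abc".toList = ['a', 'b', 'c'] := by decide
  have hmemS : ∀ c, c ∈ S ↔ c ∈ (['a', 'b', 'c'] : List Char) ∧ c ∈ l := by
    intro c; rw [hSm c]; simp [PySem.Set.empty]
  have hmemT : ∀ c, c ∈ target ↔ c ∈ (['a', 'b', 'c'] : List Char) ∧ c ∈ l := by
    intro c; simp [ht, habc, List.mem_filter]
  have hTn : target.Nodup := by
    rw [ht, habc]; exact (by decide : (['a','b','c'] : List Char).Nodup).filter _
  have hTp : target.Pairwise (fun a b : Char => (fun x => x) a < (fun x => x) b) := by
    rw [ht, habc]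
    exact (by decide : (['a','b','c'] : List Char).Pairwise (· < ·)).filter _
  by_cases hE : S = ([] : PySem.Set Char)
  · -- no standard phase found: A defaults to {a,b,c}; B's filter is empty, defaults to "abc"
    have hTnil : target = [] := by
      rw [List.eq_nil_iff_forall_not_mem]
      intro x hx
      have hxS := (hmemS x).mpr ((hmemT x).mp hx)
      rw [hE] at hxS
      simp at hxS
    rw [if_pos hE, if_pos hTnil]
    decide
  · -- at least one standard phase: sorted(S) is exactly B's filtered alphabet
    have hperm : target.Perm S := by
      rw [List.perm_ext_iff_of_nodup hTn hSn]
      intro c; rw [hmemT c, hmemS c]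
    have hsorted : PySem.List.sorted S (fun x : Char => x) = target :=
      PySem.List.sorted_eq_of_perm_of_pairwise_lt S target _ hperm hTp
    have hTne : target ≠ [] := by
      intro h
      rcases List.exists_mem_of_ne_nil S hE with ⟨x, hx⟩
      have := (hmemT x).mpr ((hmemS x).mp hx)
      simp [h] at this
    rw [if_neg hE, hsorted, if_neg hTne]

-- ===== VERDICT (by name: the statement is the Claim_ definition above) =====
theorem filter_standard_phases_spec : Claim_equal_filter_standard_phases := by
  intro phases _
  unfold Spec_filter_standard_phases
  exact pv_main phases
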